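-- pv_equiv track=rewrite | github.com/CARV-ICS-FORTH/parallax | ansible/create_regions.py | generate_script_lines
-- ===== SOURCE A (Python) =====
-- def add_leading_zeros(string, length):
--   """Add leading zeros to a string until len(string) == length."""
--   if len(string) < length:
--     for _ in range(length - len(string)):
--       string = '0' + str(string)
--   return string
--
-- def generate_script_lines(path, num_of_ranges, max_range, region_size, servers, replication):
--   """Generate bash script"""
--
--   region_size = region_size * (1024**3) # Convert GB to bytes
--
--   range_size = int(int(max_range)/num_of_ranges)
--   max_range_len = len(max_range)
--   start = add_leading_zeros('', max_range_len)
--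
--   end = add_leading_zeros(str(range_size), max_range_len)
--
--   server_id = 0
--   server_num = len(servers)
--   region_id = 0
--   script_lines = ['#!/bin/bash']
--   for i in range(num_of_ranges):
--     if i == num_of_ranges-1:
--       end = '+oo'
--     command = path + '/create_regions -c --region ' + str(region_id)
--     command += ' --minkey ' + start + ' --maxkey ' + end + ' --size '
--     command += str(region_size) + ' --host ' + servers[server_id]
--     region_id += 1
--     server_id += 1
--     if server_id == server_num:
--       server_id = 0
--
--     if replication:
--       command += ' --tail ' + servers[server_id] + ' --replicas 2'
--     script_lines.append(command)
--     if end == '+oo':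
--       break
--     start = add_leading_zeros(end, max_range_len)
--     end = add_leading_zeros(str(int(end) + range_size), max_range_len)
--   return script_lines
-- ===== SOURCE B (Python) =====
-- def generate_script_lines(path, num_of_ranges, max_range, region_size, servers, replication):
--   """Generate bash script (index-direct: each line computed from its index i)."""
--   region_size = region_size * (1024**3)  # Convert GB to bytes
--   range_size = int(int(max_range)/num_of_ranges)
--   width = len(max_range)
--   server_num = len(servers)
--
--   def command(i):
--     start = str(i * range_size).zfill(width)
--     end = '+oo' if i == num_of_ranges - 1 else str((i + 1) * range_size).zfill(width)
--     line = (path + '/create_regions -c --region ' + str(i)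
--             + ' --minkey ' + start + ' --maxkey ' + end
--             + ' --size ' + str(region_size) + ' --host ' + servers[i % server_num])
--     if replication:
--       line += ' --tail ' + servers[(i + 1) % server_num] + ' --replicas 2'
--     return line
--
--   return ['#!/bin/bash'] + [command(i) for i in range(num_of_ranges)]
-- ===== Notes on version B (the rewrite author's own statement) =====
-- stated objective: simpler
-- what changed: Each script line is computed directly from its index i (start=str(i*range_size).zfill(width), host=servers[i%server_num]) instead of threading start/end strings, a resettable server counter and a break through the loop and re-parsing the padded end string with int() every iteration.
import Mathlib
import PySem

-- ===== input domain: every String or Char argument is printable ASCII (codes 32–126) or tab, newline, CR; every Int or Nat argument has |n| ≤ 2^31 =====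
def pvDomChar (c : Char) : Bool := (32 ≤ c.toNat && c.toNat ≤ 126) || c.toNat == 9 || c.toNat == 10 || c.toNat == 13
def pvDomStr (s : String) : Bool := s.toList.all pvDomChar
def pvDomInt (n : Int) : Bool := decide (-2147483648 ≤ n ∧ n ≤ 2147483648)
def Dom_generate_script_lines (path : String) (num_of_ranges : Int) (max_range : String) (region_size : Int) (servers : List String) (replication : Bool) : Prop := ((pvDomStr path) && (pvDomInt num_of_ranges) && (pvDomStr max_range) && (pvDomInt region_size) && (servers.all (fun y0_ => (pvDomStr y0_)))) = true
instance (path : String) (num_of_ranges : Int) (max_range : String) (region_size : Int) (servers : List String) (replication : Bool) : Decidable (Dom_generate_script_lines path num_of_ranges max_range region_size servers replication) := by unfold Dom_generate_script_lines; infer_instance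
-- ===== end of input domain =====

-- B rebuilds every script line directly from its index i (zfill of i*range_size, servers[i % server_num])
-- instead of A's threaded start/end strings that are re-parsed with int() each iteration; same output, stated
-- objective: a simpler, state-free decomposition (no speed claim).

-- ===== PORT A =====
-- 'int(int(max_range)/num_of_ranges)': CPython true division of two ints is CORRECTLY ROUNDED to the nearest
-- IEEE-754 double (ties to even), and int() truncates toward zero.  The three definitions below model that
-- exactly in integer arithmetic (round-half-even of n·2^(52-E)/d at the quotient's binary exponent E, then
-- truncate); both Source B and A contain this very expression, so the model is shared by both ports.
def pyRHE (N D : Nat) : Nat :=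
  let q := N / D
  let r := N % D
  if 2 * r < D then q else if D < 2 * r then q + 1 else if q % 2 = 0 then q else q + 1

def pyTrueDivTruncMag (n d : Nat) : Nat :=
  if n = 0 then 0
  else
    let e0 : Int := (Nat.log2 n : Int) - (Nat.log2 d : Int)
    let E : Int := if d * 2 ^ e0.toNat ≤ n * 2 ^ (-e0).toNat then e0 else e0 - 1
    if E ≤ 52 then pyRHE (n * 2 ^ (52 - E).toNat) d / 2 ^ (52 - E).toNat
    else pyRHE n (d * 2 ^ (E - 52).toNat) * 2 ^ (E - 52).toNat

def pyIntTrueDivTrunc (a b : Int) : Int :=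
  if b = 0 then 0
  else if (decide (a < 0)) = (decide (b < 0)) then (pyTrueDivTruncMag a.natAbs b.natAbs : Int)
  else -(pyTrueDivTruncMag a.natAbs b.natAbs : Int)

-- the 'for _ in range(length - len(string)): string = '0' + str(string)' loop of add_leading_zeros
def aPadLoop : Nat → String → String
  | 0, s => s
  | k + 1, s => aPadLoop k ("0" ++ s)

def add_leading_zeros (string : String) (length : Int) : String :=
  if PySem.Str.len string < length then aPadLoop (length - PySem.Str.len string).toNat string
  else string

-- A's 'for i in range(num_of_ranges)' loop, with its threaded state and break
def aLoop (path : String) (num_of_ranges range_size region_size max_range_len : Int)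
    (servers : List String) (server_num : Int) (replication : Bool) :
    List Int → Int → Int → String → String → List String → List String
  | [], _server_id, _region_id, _start, _end_, acc => acc
  | i :: rest, server_id, region_id, start, end_, acc =>
    let end1 := if i == num_of_ranges - 1 then "+oo" else end_
    let command := path ++ "/create_regions -c --region " ++ PySem.Int.toStr region_id
      ++ " --minkey " ++ start ++ " --maxkey " ++ end1 ++ " --size "
      ++ PySem.Int.toStr region_size ++ " --host " ++ (PySem.List.pyGet? servers server_id).getD ""
    let region_id := region_id + 1
    let server_id := server_id + 1
    let server_id := if server_id == server_num then 0 else server_id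
    let command := if replication then
        command ++ " --tail " ++ (PySem.List.pyGet? servers server_id).getD "" ++ " --replicas 2"
      else command
    let acc := acc ++ [command]
    if end1 == "+oo" then acc
    else
      let start := add_leading_zeros end1 max_range_len
      let end_ := add_leading_zeros
        (PySem.Int.toStr ((PySem.Int.ofStr? end1).getD 0 + range_size)) max_range_len
      aLoop path num_of_ranges range_size region_size max_range_len servers server_num replication
        rest server_id region_id start end_ acc

def generate_script_lines (path : String) (num_of_ranges : Int) (max_range : String) (region_size : Int) (servers : List String) (replication : Bool) : List String :=
  let region_size := region_size * (1024 ^ 3)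
  let range_size := pyIntTrueDivTrunc ((PySem.Int.ofStr? max_range).getD 0) num_of_ranges
  let max_range_len := PySem.Str.len max_range
  let start := add_leading_zeros "" max_range_len
  let end_ := add_leading_zeros (PySem.Int.toStr range_size) max_range_len
  let server_num : Int := (servers.length : Int)
  aLoop path num_of_ranges range_size region_size max_range_len servers server_num replication
    (PySem.List.pyRange 0 num_of_ranges) 0 0 start end_ ["#!/bin/bash"]

-- ===== PORT B =====
def generate_script_lines_alt (path : String) (num_of_ranges : Int) (max_range : String) (region_size : Int) (servers : List String) (replication : Bool) : List String :=
  let region_size := region_size * (1024 ^ 3)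
  let range_size := pyIntTrueDivTrunc ((PySem.Int.ofStr? max_range).getD 0) num_of_ranges
  let width := PySem.Str.len max_range
  let server_num : Int := (servers.length : Int)
  ["#!/bin/bash"] ++ (PySem.List.pyRange 0 num_of_ranges).map (fun i =>
    let start := PySem.Str.zfill (PySem.Int.toStr (i * range_size)) width
    let end_ := if i == num_of_ranges - 1 then "+oo"
      else PySem.Str.zfill (PySem.Int.toStr ((i + 1) * range_size)) width
    let line := path ++ "/create_regions -c --region " ++ PySem.Int.toStr i
      ++ " --minkey " ++ start ++ " --maxkey " ++ end_ ++ " --size "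
      ++ PySem.Int.toStr region_size ++ " --host "
      ++ (PySem.List.pyGet? servers (PySem.Int.mod i server_num)).getD ""
    if replication then
      line ++ " --tail " ++ (PySem.List.pyGet? servers (PySem.Int.mod (i + 1) server_num)).getD ""
        ++ " --replicas 2"
    else line)

-- ===== PRECONDITION & SPEC =====
-- Pre_ excludes exactly A's exceptions plus one accidental corner: int(max_range) must parse (else
-- ValueError), num_of_ranges ≠ 0 (else ZeroDivisionError), |value| below |num_of_ranges|·(2^1024 − 2^970)
-- (at and above it the true division overflows a double and raises OverflowError), servers nonempty when the
-- loop runs (else IndexError), and — only when num_of_ranges ≥ 2 — a NON-NEGATIVE parsed value: on negative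
-- values A raises ValueError (int() on a zero-padded negative such as '0-4') on most such inputs and returns
-- only when the intermediate digit widths accidentally line up, so that corner is excluded as a whole.
-- 2^1024 - 2^970, the exact magnitude at which CPython's int/int true division overflows to a double
-- infinity (written as a numeral so that `decide` evaluates Pre_ without deep recursion)
def pyFloatOverflowThreshold : Nat := 179769313486231580793728971405303415079934132710037826936173778980444968292764750946649017977587207096330286416692887910946555547851940402630657488671505820681908902000708383676273854845817711531764475730270069855571366959622842914819860834936475292719074168444365510704342711559699508093042880177904174497792

def Pre_generate_script_lines (path : String) (num_of_ranges : Int) (max_range : String) (region_size : Int) (servers : List String) (replication : Bool) : Prop :=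
  (PySem.Int.ofStr? max_range).isSome = true ∧
  num_of_ranges ≠ 0 ∧
  ((PySem.Int.ofStr? max_range).getD 0).natAbs < num_of_ranges.natAbs * pyFloatOverflowThreshold ∧
  (2 ≤ num_of_ranges → 0 ≤ (PySem.Int.ofStr? max_range).getD 0) ∧
  (1 ≤ num_of_ranges → servers ≠ [])

instance (path : String) (num_of_ranges : Int) (max_range : String) (region_size : Int) (servers : List String) (replication : Bool) : Decidable (Pre_generate_script_lines path num_of_ranges max_range region_size servers replication) := by unfold Pre_generate_script_lines; infer_instance

def pvWitness_generate_script_lines : String × Int × String × Int × List String × Bool :=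
  ("/p", 2, "90", 1, ["h1", "h2"], true)

def Spec_generate_script_lines (path : String) (num_of_ranges : Int) (max_range : String) (region_size : Int) (servers : List String) (replication : Bool) (out : List String) : Prop := out = generate_script_lines_alt path num_of_ranges max_range region_size servers replication
instance (path : String) (num_of_ranges : Int) (max_range : String) (region_size : Int) (servers : List String) (replication : Bool) (out : List String) : Decidable (Spec_generate_script_lines path num_of_ranges max_range region_size servers replication out) := by unfold Spec_generate_script_lines; infer_instance

-- ===== CLAIM (what is proved, stated in full; the proofs are below) =====
def Claim_equal_generate_script_lines : Prop := ∀ (path : String) (num_of_ranges : Int) (max_range : String) (region_size : Int) (servers : List String) (replication : Bool), Dom_generate_script_lines path num_of_ranges max_range region_size servers replication → Pre_generate_script_lines path num_of_ranges max_range region_size servers replication → Spec_generate_script_lines path num_of_ranges max_range region_size servers replication (generate_script_lines path num_of_ranges max_range region_size servers replication)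

-- ===== LEMMAS AND PROOFS =====

theorem pyIntTrueDivTrunc_nonneg {a b : Int} (ha : 0 ≤ a) (hb : 0 < b) :
    0 ≤ pyIntTrueDivTrunc a b := by
  rw [pyIntTrueDivTrunc, if_neg (by omega)]
  have : (decide (a < 0)) = (decide (b < 0)) := by
    simp [not_lt.2 ha, not_lt.2 (le_of_lt hb)]
  rw [if_pos this]
  positivity

-- ---- a faithful public model of PySem.Int.ofChars? (whose digit loop is a private definition) ----
def myGo : List Char → Bool → Nat → Option Nat
  | [], afterDigit, acc => if afterDigit = true then some acc else none
  | c :: rest, afterDigit, acc =>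
    if c.isDigit = true then myGo rest true (acc * 10 + (c.toNat - '0'.toNat))
    else
      if c = '_' ∧ afterDigit = true then
        match rest with
        | d :: _tail => if d.isDigit = true then myGo rest false acc else none
        | [] => none
      else none
def myDigitsVal : List Char → Option Nat
  | [] => none
  | cs => myGo cs false 0

theorem go_bridge {g : List Char → Bool → Nat → Option Nat}
    (h1 : ∀ b a, g [] b a = if b = true then some a else none)
    (h2 : ∀ c cs b a, g (c :: cs) b a =
      if c.isDigit = true then g cs true (a * 10 + (c.toNat - '0'.toNat))
      else
        if c = '_' ∧ b = true then
          (match cs with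
           | d :: _tail => if d.isDigit = true then g cs false a else none
           | [] => none)
        else none) :
    ∀ cs b a, g cs b a = myGo cs b a := by
  intro cs
  induction cs with
  | nil => intro b a; rw [h1]; rfl
  | cons c cs ih =>
      intro b a
      rw [h2]; rw [myGo.eq_def]
      by_cases hc : c.isDigit = true
      · simp [hc, ih]
      · by_cases hu : c = '_' ∧ b = true
        · cases cs with
          | nil => simp [hc, hu]
          | cons d tl =>
              by_cases hd : d.isDigit = true
              · simp [hc, hu, hd, ih]
              · simp [hc, hu, hd]
        · simp [hc, hu]

theorem dv_peel {g : List Char → Bool → Nat → Option Nat}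
    (h1 : ∀ b a, g [] b a = if b = true then some a else none)
    (h2 : ∀ c cs b a, g (c :: cs) b a =
      if c.isDigit = true then g cs true (a * 10 + (c.toNat - '0'.toNat))
      else
        if c = '_' ∧ b = true then
          (match cs with
           | d :: _tail => if d.isDigit = true then g cs false a else none
           | [] => none)
        else none) :
    ∀ c cs b a,
      (if c.isDigit = true then g cs true (a * 10 + (c.toNat - '0'.toNat))
       else
         if c = '_' ∧ b = true then
           (match cs with
            | d :: _tail => if d.isDigit = true then g cs false a else none
            | [] => none)
         else none) = myGo (c :: cs) b a := by
  intro c cs b a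
  rw [← h2 c cs b a]
  exact go_bridge h1 h2 (c :: cs) b a

def myOfChars (s : List Char) : Option Int :=
  have cs := (List.dropWhile PySem.Int.isIntSpace (List.dropWhile PySem.Int.isIntSpace s).reverse).reverse
  match cs with
  | '-' :: ds => Option.map (fun n => -n) (do let a ← myDigitsVal ds; pure ((a : Nat) : Int))
  | '+' :: ds => Option.map (fun n => n) (do let a ← myDigitsVal ds; pure ((a : Nat) : Int))
  | ds => Option.map (fun n => n) (do let a ← myDigitsVal ds; pure ((a : Nat) : Int))

theorem match1_eq (t : List Char) (f1 f2 f3 g1 g2 g3 : List Char → Option Int)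
    (e1 : ∀ ds, f1 ds = g1 ds) (e2 : ∀ ds, f2 ds = g2 ds) (e3 : ∀ ds, f3 ds = g3 ds) :
    PySem.Int.ofChars?.match_1 (fun _ => Option Int) t f1 f2 f3 =
      myOfChars.match_1 (fun _ => Option Int) t g1 g2 g3 := by
  cases t with
  | nil => exact e3 []
  | cons c cs =>
      by_cases h1 : c = '-'
      · subst h1; exact e1 cs
      · by_cases h2 : c = '+'
        · subst h2; exact e2 cs
        · have L : PySem.Int.ofChars?.match_1 (fun _ => Option Int) (c :: cs) f1 f2 f3 = f3 (c :: cs) := by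
            delta PySem.Int.ofChars?.match_1 PySem.Int.ofChars?._sparseCasesOn_1
            simp [h1, h2]
          have R : myOfChars.match_1 (fun _ => Option Int) (c :: cs) g1 g2 g3 = g3 (c :: cs) := by
            delta myOfChars.match_1 myOfChars._sparseCasesOn_1
            simp [h1, h2]
          rw [L, R]; exact e3 _

theorem ofChars_eq_my (s : List Char) : PySem.Int.ofChars? s = myOfChars s := by
  simp only [PySem.Int.ofChars?, myOfChars]
  refine match1_eq _ _ _ _ _ _ _ ?_ ?_ ?_
  all_goals {
    intro ds
    congr 1
    congr 1
    cases ds with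
    | nil => rfl
    | cons c' cs' =>
        show _ = myGo (c' :: cs') false 0
        refine dv_peel ?_ ?_ c' cs' false 0
        · exact fun b a => rfl
        · exact fun c'' cs'' b a => rfl
  }

-- ---- digit strings and their values ----

def valFrom (a : Nat) (ds : List Char) : Nat :=
  ds.foldl (fun a c => a * 10 + (c.toNat - '0'.toNat)) a

theorem valFrom_append (a : Nat) (xs ys : List Char) :
    valFrom a (xs ++ ys) = valFrom (valFrom a xs) ys := List.foldl_append

theorem myGo_run : ∀ (ds : List Char) (b : Bool) (a : Nat),
    ds.all Char.isDigit = true → (ds = [] → b = true) →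
    myGo ds b a = some (valFrom a ds) := by
  intro ds
  induction ds with
  | nil => intro b a _ hb; rw [hb rfl]; rfl
  | cons c cs ih =>
      intro b a hall _
      simp only [List.all_cons, Bool.and_eq_true] at hall
      rw [myGo.eq_def]
      simp only [hall.1, if_true]
      cases cs with
      | nil => rw [myGo.eq_def]; rfl
      | cons d tl => rw [ih true _ hall.2 (by simp)]; rfl

theorem digit_not_space {c : Char} (h : c.isDigit = true) : PySem.Int.isIntSpace c = false := by
  simp only [Char.isDigit, decide_eq_true_eq, Bool.and_eq_true] at h
  simp only [PySem.Int.isIntSpace, Bool.or_eq_false_iff, decide_eq_false_iff_not]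
  refine ⟨⟨⟨⟨⟨?_, ?_⟩, ?_⟩, ?_⟩, ?_⟩, ?_⟩ <;> rintro rfl <;> revert h <;> decide

theorem digit_ne_minus {c : Char} (h : c.isDigit = true) : c ≠ '-' := by
  rintro rfl; revert h; decide

theorem digit_ne_plus {c : Char} (h : c.isDigit = true) : c ≠ '+' := by
  rintro rfl; revert h; decide

theorem dropWhile_all_digit {ds : List Char} (h : ds.all Char.isDigit = true) :
    List.dropWhile PySem.Int.isIntSpace ds = ds := by
  cases ds with
  | nil => rfl
  | cons c cs =>
      simp only [List.all_cons, Bool.and_eq_true] at h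
      rw [List.dropWhile_cons, digit_not_space h.1]
      simp

theorem myOfChars_digits {ds : List Char} (hall : ds.all Char.isDigit = true) (hne : ds ≠ []) :
    myOfChars ds = some ((valFrom 0 ds : Nat) : Int) := by
  have hrev : ds.reverse.all Char.isDigit = true := by simpa using hall
  have hstrip : (List.dropWhile PySem.Int.isIntSpace
      (List.dropWhile PySem.Int.isIntSpace ds).reverse).reverse = ds := by
    rw [dropWhile_all_digit hall, dropWhile_all_digit hrev, List.reverse_reverse]
  simp only [myOfChars]
  rw [hstrip]
  cases ds with
  | nil => exact absurd rfl hne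
  | cons c cs =>
      simp only [List.all_cons, Bool.and_eq_true] at hall
      have h1 : c ≠ '-' := digit_ne_minus hall.1
      have h2 : c ≠ '+' := digit_ne_plus hall.1
      have L : myOfChars.match_1 (fun _ => Option Int) (c :: cs)
          (fun ds => Option.map (fun n => -n) (do let a ← myDigitsVal ds; pure ((a : Nat) : Int)))
          (fun ds => Option.map (fun n => n) (do let a ← myDigitsVal ds; pure ((a : Nat) : Int)))
          (fun ds => Option.map (fun n => n) (do let a ← myDigitsVal ds; pure ((a : Nat) : Int)))
          = Option.map (fun n => n) (do let a ← myDigitsVal (c :: cs); pure ((a : Nat) : Int)) := by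
        delta myOfChars.match_1 myOfChars._sparseCasesOn_1
        simp [h1, h2]
      rw [L]
      have : myDigitsVal (c :: cs) = myGo (c :: cs) false 0 := rfl
      rw [this, myGo_run (c :: cs) false 0 (by simp [hall.1, hall.2]) (by simp)]
      rfl

-- ---- Nat.toDigits: digits, nonemptiness, value ----

theorem digitChar_isDigit {m : Nat} (h : m < 10) : (Nat.digitChar m).isDigit = true := by
  interval_cases m <;> decide

theorem digitChar_val {m : Nat} (h : m < 10) : (Nat.digitChar m).toNat - 48 = m := by
  interval_cases m <;> decide

theorem toDigitsCore_acc (f : Nat) : ∀ (n : Nat) (ds : List Char), n < f →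
    Nat.toDigitsCore 10 f n ds = Nat.toDigits 10 n ++ ds := by
  induction f using Nat.strong_induction_on with
  | _ f ihf =>
    intro n ds hnf
    match f, hnf with
    | f + 1, hnf =>
      rw [Nat.toDigitsCore]
      by_cases h0 : n / 10 = 0
      · rw [h0]
        simp only [reduceIte]
        have : Nat.toDigits 10 n = [Nat.digitChar (n % 10)] := by
          rw [Nat.toDigits, Nat.toDigitsCore]
          simp [h0]
        rw [this]; rfl
      · rw [if_neg h0]
        have hdlt : n / 10 < n := Nat.div_lt_self (by omega) (by norm_num)
        have hR : Nat.toDigits 10 n = Nat.toDigits 10 (n / 10) ++ [Nat.digitChar (n % 10)] := by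
          rw [Nat.toDigits, Nat.toDigitsCore]
          rw [if_neg h0]
          rw [ihf n hnf (n / 10) [Nat.digitChar (n % 10)] hdlt]
        rw [ihf f (by omega) (n / 10) (Nat.digitChar (n % 10) :: ds) (by omega), hR]
        simp

theorem toDigits_step (n : Nat) (h0 : n / 10 ≠ 0) :
    Nat.toDigits 10 n = Nat.toDigits 10 (n / 10) ++ [Nat.digitChar (n % 10)] := by
  rw [Nat.toDigits, Nat.toDigitsCore]
  simp only [if_neg h0]
  exact toDigitsCore_acc n (n / 10) [Nat.digitChar (n % 10)]
    (Nat.div_lt_self (by omega) (by norm_num))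

theorem toDigits_base (n : Nat) (h0 : n / 10 = 0) :
    Nat.toDigits 10 n = [Nat.digitChar (n % 10)] := by
  rw [Nat.toDigits, Nat.toDigitsCore]
  simp [h0]

theorem toDigits_all_digit (n : Nat) : (Nat.toDigits 10 n).all Char.isDigit = true := by
  induction n using Nat.strong_induction_on with
  | _ n ih =>
    by_cases h0 : n / 10 = 0
    · rw [toDigits_base n h0]
      simp [digitChar_isDigit (Nat.mod_lt n (by norm_num))]
    · rw [toDigits_step n h0]
      have := ih (n / 10) (Nat.div_lt_self ((by omega : 0 < n)) (by norm_num))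
      simp [this, digitChar_isDigit (Nat.mod_lt n (by norm_num))]

theorem toDigits_ne_nil (n : Nat) : Nat.toDigits 10 n ≠ [] := by
  by_cases h0 : n / 10 = 0
  · rw [toDigits_base n h0]; simp
  · rw [toDigits_step n h0]; simp

theorem valFrom_toDigits (n : Nat) : ∀ a : Nat,
    valFrom a (Nat.toDigits 10 n) = a * 10 ^ (Nat.toDigits 10 n).length + n := by
  induction n using Nat.strong_induction_on with
  | _ n ih =>
    intro a
    by_cases h0 : n / 10 = 0
    · rw [toDigits_base n h0]
      have hm : n % 10 = n := by omega
      have hn : n < 10 := by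
        have := Nat.mod_lt n (show 0 < 10 by norm_num); omega
      simp [valFrom, hm]
      rw [digitChar_val hn]
    · rw [toDigits_step n h0]
      rw [valFrom_append]
      have hlt : n / 10 < n := Nat.div_lt_self ((by omega : 0 < n)) (by norm_num)
      rw [ih (n / 10) hlt a]
      have hv : valFrom (a * 10 ^ (Nat.toDigits 10 (n / 10)).length + n / 10) [Nat.digitChar (n % 10)]
          = (a * 10 ^ (Nat.toDigits 10 (n / 10)).length + n / 10) * 10 + n % 10 := by
        simp [valFrom, digitChar_val (show n % 10 < 10 from Nat.mod_lt n (by norm_num))]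
      rw [hv]
      simp only [List.length_append, List.length_cons, List.length_nil]
      ring_nf
      omega

theorem valFrom_zero_toDigits (n : Nat) : valFrom 0 (Nat.toDigits 10 n) = n := by
  rw [valFrom_toDigits n 0]; simp

theorem valFrom_replicate_zero (k : Nat) (ds : List Char) :
    valFrom 0 (List.replicate k '0' ++ ds) = valFrom 0 ds := by
  rw [valFrom_append]
  congr 1
  induction k with
  | zero => rfl
  | succ m ih => rw [List.replicate_succ]; simpa [valFrom] using ih

-- ---- int(str(x)) round trips, zfill and A's padding on digit strings ----

theorem toChars_nonneg {x : Int} (hx : 0 ≤ x) : PySem.Int.toChars x = Nat.toDigits 10 x.toNat := by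
  simp [PySem.Int.toChars, not_lt.2 hx]

theorem ofChars_roundtrip {x : Int} (hx : 0 ≤ x) (k : Nat) :
    PySem.Int.ofChars? (List.replicate k '0' ++ PySem.Int.toChars x) = some x := by
  rw [ofChars_eq_my, toChars_nonneg hx]
  have hall : (List.replicate k '0' ++ Nat.toDigits 10 x.toNat).all Char.isDigit = true := by
    simp only [List.all_append, Bool.and_eq_true]
    exact ⟨by simp, toDigits_all_digit x.toNat⟩
  have hne : (List.replicate k '0' ++ Nat.toDigits 10 x.toNat) ≠ [] := by
    simp [toDigits_ne_nil x.toNat]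
  rw [myOfChars_digits hall hne, valFrom_replicate_zero, valFrom_zero_toDigits]
  simp [Int.toNat_of_nonneg hx]

theorem zfill_digits {ds : List Char} (w : Int) (hall : ds.all Char.isDigit = true) :
    PySem.Chars.zfill ds w = List.replicate (w.toNat - ds.length) '0' ++ ds := by
  simp only [PySem.Chars.zfill]
  by_cases hle : w ≤ (ds.length : Int)
  · rw [if_pos hle]
    have : w.toNat - ds.length = 0 := by omega
    rw [this]
    rfl
  · rw [if_neg hle]
    cases ds with
    | nil => simp
    | cons c cs =>
        simp only [List.all_cons, Bool.and_eq_true] at hall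
        have hc := hall.1
        have hsign : ¬(c = '+' ∨ c = '-') := by
          rintro (rfl | rfl) <;> revert hc <;> decide
        simp [hsign]

theorem aPadLoop_toList : ∀ (k : Nat) (s : String),
    (aPadLoop k s).toList = List.replicate k '0' ++ s.toList := by
  intro k
  induction k with
  | zero => intro s; simp [aPadLoop]
  | succ m ih =>
      intro s
      rw [aPadLoop, ih ("0" ++ s), String.toList_append]
      rw [show ("0" : String).toList = ['0'] from rfl]
      rw [List.replicate_succ']
      simp [List.append_assoc]

theorem add_leading_zeros_toList (s : String) (w : Int) :
    (add_leading_zeros s w).toList = List.replicate (w.toNat - s.toList.length) '0' ++ s.toList := by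
  rw [add_leading_zeros]
  by_cases h : PySem.Str.len s < w
  · rw [if_pos h, aPadLoop_toList]
    have : (w - PySem.Str.len s).toNat = w.toNat - s.toList.length := by
      simp only [PySem.Str.len] at h ⊢; omega
    rw [this]
  · rw [if_neg h]
    have : w.toNat - s.toList.length = 0 := by
      simp only [PySem.Str.len, not_lt] at h; omega
    rw [this]
    rfl

theorem pad_eq_zfill {s : String} (w : Int) (hall : s.toList.all Char.isDigit = true) :
    add_leading_zeros s w = PySem.Str.zfill s w := by
  apply String.toList_inj.mp
  rw [add_leading_zeros_toList, PySem.Str.toList_zfill, zfill_digits w hall]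

-- ---- the zero-filled boundary strings both programs produce ----

def Zs (L x : Int) : String := PySem.Str.zfill (PySem.Int.toStr x) L

theorem toStr_all_digit {x : Int} (hx : 0 ≤ x) :
    (PySem.Int.toStr x).toList.all Char.isDigit = true := by
  rw [PySem.Int.toList_toStr, toChars_nonneg hx]
  exact toDigits_all_digit x.toNat

theorem Zs_toList {L x : Int} (hx : 0 ≤ x) :
    (Zs L x).toList = List.replicate (L.toNat - (PySem.Int.toChars x).length) '0'
      ++ PySem.Int.toChars x := by
  rw [Zs, PySem.Str.toList_zfill, zfill_digits L (toStr_all_digit hx), PySem.Int.toList_toStr]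

theorem Zs_parse {L x : Int} (hx : 0 ≤ x) : PySem.Int.ofStr? (Zs L x) = some x := by
  rw [PySem.Int.ofStr?, Zs_toList hx, ofChars_roundtrip hx]

theorem Zs_len {L x : Int} (hL : 0 ≤ L) (hx : 0 ≤ x) : L ≤ PySem.Str.len (Zs L x) := by
  rw [PySem.Str.len, Zs_toList hx]
  have hne : PySem.Int.toChars x ≠ [] := by
    rw [toChars_nonneg hx]; exact toDigits_ne_nil x.toNat
  have : 1 ≤ (PySem.Int.toChars x).length := List.length_pos_of_ne_nil hne
  simp only [List.length_append, List.length_replicate]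
  omega

theorem Zs_pad_noop {L x : Int} (hL : 0 ≤ L) (hx : 0 ≤ x) :
    add_leading_zeros (Zs L x) L = Zs L x := by
  rw [add_leading_zeros, if_neg (not_lt.2 (Zs_len hL hx))]

theorem Zs_ne_oo {L x : Int} (hx : 0 ≤ x) : ((Zs L x == "+oo") : Bool) = false := by
  rw [beq_eq_false_iff_ne]
  intro h
  have h2 := congrArg String.toList h
  rw [Zs_toList hx, show ("+oo" : String).toList = ['+', 'o', 'o'] from rfl] at h2
  have hall : (List.replicate (L.toNat - (PySem.Int.toChars x).length) '0'
      ++ PySem.Int.toChars x).all Char.isDigit = true := by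
    simp only [List.all_append, Bool.and_eq_true]
    refine ⟨by simp, ?_⟩
    rw [toChars_nonneg hx]; exact toDigits_all_digit x.toNat
  rw [h2] at hall
  simp at hall

theorem mod_zero_left {m : Int} (hm : 0 < m) : PySem.Int.mod 0 m = 0 := by
  rw [PySem.Int.mod_eq_emod_of_pos hm]
  simp

theorem mod_step {i m : Int} (hi : 0 ≤ i) (hm : 0 < m) :
    (if ((PySem.Int.mod i m + 1 : Int) == m) then (0 : Int) else PySem.Int.mod i m + 1)
      = PySem.Int.mod (i + 1) m := by
  rw [PySem.Int.mod_eq_emod_of_pos hm, PySem.Int.mod_eq_emod_of_pos hm]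
  have h1 : 0 ≤ i % m := Int.emod_nonneg i (by omega)
  have h2 : i % m < m := Int.emod_lt_of_pos i hm
  have hstep : (i + 1) % m = (i % m + 1) % m := by
    have hd := Int.emod_add_ediv i m
    have hdecomp : i + 1 = (i % m + 1) + m * (i / m) := by omega
    rw [hdecomp, Int.add_mul_emod_self_left]
  by_cases he : i % m + 1 = m
  · rw [if_pos (beq_iff_eq.mpr (by omega))]
    rw [hstep, he]
    simp
  · rw [if_neg (by rw [beq_iff_eq]; omega)]
    rw [hstep, Int.emod_eq_of_lt (a := i % m + 1) (b := m) (by omega) (by omega)]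

-- ---- the per-index command of port B, and the loop correspondence ----

def bline (path : String) (n r rsz L : Int) (servers : List String) (m : Int) (repl : Bool)
    (i : Int) : String :=
  let start := PySem.Str.zfill (PySem.Int.toStr (i * r)) L
  let end_ := if i == n - 1 then "+oo" else PySem.Str.zfill (PySem.Int.toStr ((i + 1) * r)) L
  let line := path ++ "/create_regions -c --region " ++ PySem.Int.toStr i
    ++ " --minkey " ++ start ++ " --maxkey " ++ end_ ++ " --size "
    ++ PySem.Int.toStr rsz ++ " --host "
    ++ (PySem.List.pyGet? servers (PySem.Int.mod i m)).getD ""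
  if repl then
    line ++ " --tail " ++ (PySem.List.pyGet? servers (PySem.Int.mod (i + 1) m)).getD ""
      ++ " --replicas 2"
  else line

theorem balt_unfold (path : String) (num_of_ranges : Int) (max_range : String) (region_size : Int)
    (servers : List String) (replication : Bool) :
    generate_script_lines_alt path num_of_ranges max_range region_size servers replication
      = "#!/bin/bash" :: (PySem.List.pyRange 0 num_of_ranges).map
          (bline path num_of_ranges
            (pyIntTrueDivTrunc ((PySem.Int.ofStr? max_range).getD 0) num_of_ranges)
            (region_size * (1024 ^ 3)) (PySem.Str.len max_range) servers
            ((servers.length : Int)) replication) := rfl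

theorem aLoop_inv (path : String) (n r rsz L : Int) (servers : List String) (m : Int) (repl : Bool)
    (hr : 2 ≤ n → 0 ≤ r) (hm : 0 < m) (hL : 1 ≤ L) :
    ∀ (k : Nat) (i : Int) (e : String) (acc : List String), 0 ≤ i → n = i + k →
    (i < n - 1 → e = Zs L ((i + 1) * r)) →
    aLoop path n r rsz L servers m repl (PySem.List.pyRange i n) (PySem.Int.mod i m) i
        (Zs L (i * r)) e acc
      = acc ++ (PySem.List.pyRange i n).map (bline path n r rsz L servers m repl) := by
  intro k
  induction k with
  | zero =>
      intro i e acc hi hn _he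
      rw [PySem.List.pyRange_one_eq_nil (by omega)]
      simp [aLoop]
  | succ k ih =>
      intro i e acc hi hn he
      rw [PySem.List.pyRange_one_cons (by omega)]
      rw [aLoop]
      simp only []
      rw [mod_step hi hm]
      by_cases hlast : i = n - 1
      · have hbeq : ((i == n - 1) : Bool) = true := beq_iff_eq.mpr hlast
        rw [hbeq]
        simp only [if_true, reduceIte]
        have hk0 : (k : Int) = 0 := by omega
        rw [PySem.List.pyRange_one_eq_nil (by omega)]
        rw [List.map_cons, List.map_nil]
        rw [bline]
        simp only [hbeq, if_true, reduceIte]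
        rfl
      · have hr' : 0 ≤ r := hr (by omega)
        have hir : 0 ≤ (i + 1) * r := mul_nonneg (by omega) hr'
        rw [he (by omega)]
        have hbeq : ((i == n - 1) : Bool) = false := by rw [beq_eq_false_iff_ne]; exact hlast
        rw [hbeq]
        simp only [Bool.false_eq_true, if_false]
        rw [Zs_ne_oo hir]
        simp only [Bool.false_eq_true, if_false]
        rw [Zs_pad_noop (by omega) hir, Zs_parse hir]
        simp only [Option.getD_some]
        rw [pad_eq_zfill L (toStr_all_digit (by positivity))]
        have harith : (i + 1) * r + r = (i + 1 + 1) * r := by ring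
        rw [harith]
        rw [show PySem.Str.zfill (PySem.Int.toStr ((i + 1 + 1) * r)) L = Zs L ((i + 1 + 1) * r) from rfl]
        have hcmd : (if repl = true then
            path ++ "/create_regions -c --region " ++ PySem.Int.toStr i ++ " --minkey " ++ Zs L (i * r)
              ++ " --maxkey " ++ Zs L ((i + 1) * r) ++ " --size " ++ PySem.Int.toStr rsz
              ++ " --host " ++ (PySem.List.pyGet? servers (PySem.Int.mod i m)).getD ""
              ++ " --tail " ++ (PySem.List.pyGet? servers (PySem.Int.mod (i + 1) m)).getD ""
              ++ " --replicas 2"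
          else
            path ++ "/create_regions -c --region " ++ PySem.Int.toStr i ++ " --minkey " ++ Zs L (i * r)
              ++ " --maxkey " ++ Zs L ((i + 1) * r) ++ " --size " ++ PySem.Int.toStr rsz
              ++ " --host " ++ (PySem.List.pyGet? servers (PySem.Int.mod i m)).getD "")
            = bline path n r rsz L servers m repl i := by
          rw [bline]
          simp only [hbeq, Bool.false_eq_true, if_false]
          rfl
        rw [hcmd]
        rw [ih (i + 1) (Zs L ((i + 1 + 1) * r)) (acc ++ [bline path n r rsz L servers m repl i])
          (by omega) (by omega) (fun _ => rfl)]
        rw [PySem.List.pyRange_one_cons (by omega), List.map_cons]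
        rw [List.append_assoc]
        congr 1

theorem ofChars_nil : PySem.Int.ofChars? [] = none := by
  rw [ofChars_eq_my]; rfl

theorem toList_ne_nil_of_parse {s : String} {v : Int} (h : PySem.Int.ofStr? s = some v) :
    s.toList ≠ [] := by
  intro hnil
  rw [PySem.Int.ofStr?, hnil, ofChars_nil] at h
  simp at h

theorem start_init {L : Int} (hL : 1 ≤ L) : add_leading_zeros "" L = Zs L (0 * (r : Int)) := by
  rw [zero_mul]
  apply String.toList_inj.mp
  rw [add_leading_zeros_toList, Zs_toList le_rfl]
  rw [show ("" : String).toList = [] from rfl, show PySem.Int.toChars 0 = ['0'] from rfl]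
  rw [List.append_nil, List.length_nil, Nat.sub_zero, List.length_singleton]
  rw [show L.toNat = (L.toNat - 1) + 1 by omega, List.replicate_succ']
  simp

-- ===== VERDICT (by name: the statement is the Claim_ definition above) =====
theorem generate_script_lines_spec : Claim_equal_generate_script_lines := by
  intro path n mr rsz servers repl _hdom hpre
  obtain ⟨hsome, hn0, _hov, hnn, hsrv⟩ := hpre
  unfold Spec_generate_script_lines
  cases hv : PySem.Int.ofStr? mr with
  | none => rw [hv] at hsome; simp at hsome
  | some v =>
      rw [hv] at hnn
      simp only [Option.getD_some] at hnn
      rw [balt_unfold]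
      simp only [generate_script_lines]
      rw [hv]
      simp only [Option.getD_some]
      by_cases hpos : 1 ≤ n
      · have hm : 0 < ((servers.length : Int)) := by
          have : servers ≠ [] := hsrv hpos
          have : 0 < servers.length := List.length_pos_of_ne_nil this
          omega
        have hL : 1 ≤ PySem.Str.len mr := by
          have hne := toList_ne_nil_of_parse hv
          have : 0 < mr.toList.length := List.length_pos_of_ne_nil hne
          rw [PySem.Str.len]
          omega
        have hr : 2 ≤ n → 0 ≤ pyIntTrueDivTrunc v n := fun h2 =>
          pyIntTrueDivTrunc_nonneg (hnn h2) (by omega)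
        rw [start_init (r := pyIntTrueDivTrunc v n) hL]
        have key := aLoop_inv path n (pyIntTrueDivTrunc v n) (rsz * 1024 ^ 3) (PySem.Str.len mr)
          servers ((servers.length : Int)) repl hr hm hL n.toNat 0
          (add_leading_zeros (PySem.Int.toStr (pyIntTrueDivTrunc v n)) (PySem.Str.len mr))
          ["#!/bin/bash"] le_rfl (by omega)
          (fun hlt => by
            rw [pad_eq_zfill (PySem.Str.len mr) (toStr_all_digit (hr (by omega)))]
            rw [Zs, zero_add, one_mul])
        rw [mod_zero_left hm] at key
        rw [key]
        rfl
      · rw [PySem.List.pyRange_one_eq_nil (by omega)]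
        rw [aLoop]
        rfl
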